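-- pv_equiv track=rewrite | github.com/JulianV87/schema-eic | scripts/extract_data.py | dedup_chars
-- ===== SOURCE A (Python) =====
-- def dedup_chars(text):
--     """Dédouble les caractères (PPoossttee → Poste) mais PAS les chiffres"""
--     if len(text) < 2:
--         return text
--     result = []
--     i = 0
--     while i < len(text):
--         result.append(text[i])
--         # Ne dédoubler que les lettres, pas les chiffres (sinon PN 11 → PN 1)
--         if i + 1 < len(text) and text[i] == text[i + 1] and not text[i].isdigit():
--             i += 2  # Sauter le doublon
--         else:
--             i += 1
--     return "".join(result)
-- ===== SOURCE B (Python) =====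
-- def dedup_chars(text):
--     """Run-based rewrite: scan maximal runs of equal characters and keep a
--     closed-form count per run (all of a digit run, ceil(len/2) otherwise)."""
--     pieces = []
--     i = 0
--     n = len(text)
--     while i < n:
--         j = i
--         while j < n and text[j] == text[i]:
--             j += 1
--         run = j - i
--         keep = run if text[i].isdigit() else (run + 1) // 2
--         pieces.append(text[i] * keep)
--         i = j
--     return "".join(pieces)
-- ===== Notes on version B (the rewrite author's own statement) =====
-- stated objective: alternative
-- what changed: Replaces A's index-based skip-by-2 pairwise scan with a scan over maximal runs of equal characters, computing the kept count per run in closed form (full run for digits, ceil(len/2) otherwise).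
import Mathlib
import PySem

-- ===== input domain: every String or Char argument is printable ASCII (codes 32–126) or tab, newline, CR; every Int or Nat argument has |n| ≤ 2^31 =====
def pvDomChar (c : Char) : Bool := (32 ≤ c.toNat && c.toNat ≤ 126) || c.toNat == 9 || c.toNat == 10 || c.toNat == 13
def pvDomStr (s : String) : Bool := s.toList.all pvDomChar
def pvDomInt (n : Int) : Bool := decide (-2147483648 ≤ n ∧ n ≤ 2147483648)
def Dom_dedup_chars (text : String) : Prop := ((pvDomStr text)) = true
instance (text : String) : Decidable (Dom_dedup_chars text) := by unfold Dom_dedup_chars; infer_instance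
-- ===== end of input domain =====

-- B replaces A's pairwise skip-by-2 scan with a scan over maximal runs of equal
-- characters, keeping a closed-form count per run (objective: alternative).

-- ===== PORT A =====
-- A's while loop: append text[i]; skip the next char iff it equals text[i] and
-- text[i] is not a digit.
def dedupA : List Char → List Char
  | [] => []
  | [c] => [c]
  | c :: d :: rest =>
      if c == d && !(PySem.Chars.isdigit c) then c :: dedupA rest
      else c :: dedupA (d :: rest)

def dedup_chars (text : String) : String :=
  if text.toList.length < 2 then text
  else String.ofList (dedupA text.toList)

-- ===== PORT B =====
-- B's inner while loop: measure the maximal run of c at the front of l,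
-- returning (extra equal chars, remainder).
def runLen (c : Char) : List Char → Nat × List Char
  | [] => (0, [])
  | d :: rest =>
      if d == c then
        let p := runLen c rest
        (p.1 + 1, p.2)
      else (0, d :: rest)

theorem runLen_snd_length_le (c : Char) : ∀ l : List Char, (runLen c l).2.length ≤ l.length
  | [] => by simp [runLen]
  | d :: rest => by
      by_cases h : d == c
      · simpa [runLen, h] using Nat.le_succ_of_le (runLen_snd_length_le c rest)
      · simp [runLen, h]

-- B's outer loop over runs: keep the whole run for a digit, ceil(len/2) otherwise.
def dedupB : List Char → List Char
  | [] => []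
  | c :: rest =>
      let p := runLen c rest
      let run := p.1 + 1
      let keep := if PySem.Chars.isdigit c then run else (run + 1) / 2
      List.replicate keep c ++ dedupB p.2
termination_by l => l.length
decreasing_by
  simpa using Nat.lt_succ_of_le (runLen_snd_length_le c rest)

def dedup_chars_alt (text : String) : String :=
  String.ofList (dedupB text.toList)

-- ===== PRECONDITION & SPEC =====
def Spec_dedup_chars (text : String) (out : String) : Prop := out = dedup_chars_alt text
instance (text : String) (out : String) : Decidable (Spec_dedup_chars text out) := by unfold Spec_dedup_chars; infer_instance

-- ===== CLAIM (what is proved, stated in full; the proofs are below) =====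
def Claim_equal_dedup_chars : Prop := ∀ (text : String), Dom_dedup_chars text → Spec_dedup_chars text (dedup_chars text)

-- ===== LEMMAS AND PROOFS =====

-- On a digit run, A keeps every character.
theorem dedupA_digit_run (c : Char) (hc : PySem.Chars.isdigit c = true) :
    ∀ l : List Char, dedupA (c :: l) =
      List.replicate ((runLen c l).1 + 1) c ++ dedupA (runLen c l).2
  | [] => by simp [dedupA, runLen]
  | d :: t => by
      by_cases h : d == c
      · have hd : c = d := ((by simpa using h : d = c)).symm
        subst hd
        have ih := dedupA_digit_run c hc t
        simp [dedupA, hc, runLen, ih, List.replicate_succ]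
      · have hne : (c == d) = false := by
          simp at h ⊢; exact fun e => h e.symm
        simp [dedupA, hne, runLen, h, List.replicate]

-- On a non-digit run of length n+1, A keeps ⌈(n+1)/2⌉ characters.
theorem dedupA_nondigit_run (c : Char) (hc : PySem.Chars.isdigit c = false) :
    ∀ l : List Char, dedupA (c :: l) =
      List.replicate (((runLen c l).1 + 2) / 2) c ++ dedupA (runLen c l).2
  | [] => by simp [dedupA, runLen]
  | d :: t => by
      by_cases h : d == c
      · have hd : c = d := ((by simpa using h : d = c)).symm
        subst hd
        match t with
        | [] => simp [dedupA, hc, runLen]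
        | e :: t' =>
          by_cases he : e == c
          · have he' : c = e := ((by simpa using he : e = c)).symm
            subst he'
            have ih := dedupA_nondigit_run c hc t'
            have harith : ((runLen c t').1 + 2) / 2 + 1 = ((runLen c t').1 + 1 + 1 + 2) / 2 := by
              omega
            simp only [dedupA, hc, Bool.not_false, BEq.refl, Bool.and_self,
              if_true, runLen, ih]
            simp [← harith, List.replicate_succ]
          · have hne : (e == c) = false := by simpa using he
            simp [dedupA, hc, runLen, hne]
      · have hne : (c == d) = false := by
          simp at h ⊢; exact fun e => h e.symm
        have hdc : (d == c) = false := by simpa using h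
        simp [dedupA, hne, hc, runLen, hdc]
termination_by l => l.length

theorem dedupA_eq_dedupB : ∀ l : List Char, dedupA l = dedupB l
  | [] => by simp [dedupA, dedupB]
  | c :: rest => by
      have hr := runLen_snd_length_le c rest
      have ih := dedupA_eq_dedupB (runLen c rest).2
      by_cases hd : PySem.Chars.isdigit c
      · rw [dedupB, dedupA_digit_run c hd rest]
        simp [hd, ih]
      · rw [dedupB, dedupA_nondigit_run c (by simpa using hd) rest]
        simp [hd, ih]
        omega
termination_by l => l.length
decreasing_by
  simpa using Nat.lt_succ_of_le (runLen_snd_length_le c rest)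

-- ===== VERDICT (by name: the statement is the Claim_ definition above) =====
-- dedupB is the identity on strings of length < 2 (A's early-return case).
theorem dedupB_short : ∀ l : List Char, l.length < 2 → dedupB l = l
  | [], _ => by simp [dedupB]
  | [c], _ => by
      rw [dedupB]
      simp [runLen, dedupB]
  | _ :: _ :: _, h => by simp at h

theorem dedup_chars_spec : Claim_equal_dedup_chars := by
  intro text _
  unfold Spec_dedup_chars dedup_chars dedup_chars_alt
  split
  · next h => rw [dedupB_short text.toList h, String.ofList_toList]
  · rw [dedupA_eq_dedupB]
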